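-- pv_equiv track=rewrite | github.com/chanko08/animal-crossing-turnip-prices | turnips/patterns/__init__.py | consolidate_predictions
-- ===== SOURCE A (Python) =====
-- def consolidate_predictions(predictions):
--     pattern = {}
--
--     for prices in predictions:
--         for i, price in enumerate(prices):
--             if i not in pattern:
--                 pattern[i] = price
--
--             min_price_point = min(pattern[i][0], price[0])
--             max_price_point = max(pattern[i][1], price[1])
--             pattern[i] = (min_price_point, max_price_point)
--
--     return [r for _, r in sorted(pattern.items(), key=lambda x: x[0])]
-- ===== SOURCE B (Python) =====
-- def consolidate_predictions(predictions):
--     maxlen = max((len(p) for p in predictions), default=0)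
--     return [
--         (min(p[i][0] for p in predictions if i < len(p)),
--          max(p[i][1] for p in predictions if i < len(p)))
--         for i in range(maxlen)
--     ]
-- ===== Notes on version B (the rewrite author's own statement) =====
-- stated objective: simpler
-- what changed: B computes the column-wise aggregate directly: for each index i up to the longest prediction it takes min/max over the rows that reach i, instead of A's row-by-row dict accumulation followed by sorting the dict items by key.
import Mathlib
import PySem

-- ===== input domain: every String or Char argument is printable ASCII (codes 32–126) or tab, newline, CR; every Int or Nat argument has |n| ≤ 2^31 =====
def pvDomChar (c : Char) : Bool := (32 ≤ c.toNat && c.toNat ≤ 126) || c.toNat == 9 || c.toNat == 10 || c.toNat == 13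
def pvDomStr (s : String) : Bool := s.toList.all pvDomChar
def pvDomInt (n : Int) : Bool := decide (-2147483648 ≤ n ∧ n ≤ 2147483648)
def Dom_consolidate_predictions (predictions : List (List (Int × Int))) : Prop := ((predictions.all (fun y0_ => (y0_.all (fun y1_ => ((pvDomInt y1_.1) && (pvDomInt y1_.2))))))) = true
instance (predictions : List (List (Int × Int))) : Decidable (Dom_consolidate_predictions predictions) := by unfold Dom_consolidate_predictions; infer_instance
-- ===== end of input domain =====

-- B replaces A's row-by-row dict accumulation + final sort by a direct column-wise
-- min/max aggregation over the rows that reach each index (simpler decomposition, same cost).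


-- ===== PORT A =====
-- one step of A's inner loop body: conditional insert for a fresh index, then the min/max update.
-- `pattern[i]` is read right after the branch that guarantees the key is present, so the
-- default argument of `getD` is unreachable.
def consolidateStep (pat : PySem.Dict Int (Int × Int)) (ip : Int × (Int × Int)) :
    PySem.Dict Int (Int × Int) :=
  let i := ip.1
  let price := ip.2
  let pat1 := if pat.contains i then pat else pat.insert i price
  let cur := pat1.getD i price
  pat1.insert i (min cur.1 price.1, max cur.2 price.2)

def consolidate_predictions (predictions : List (List (Int × Int))) : List (Int × Int) :=
  let pattern := predictions.foldl
    (fun pat prices => (PySem.List.enumerate prices).foldl consolidateStep pat)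
    PySem.Dict.empty
  (PySem.List.sorted pattern.items (fun x => x.1) false).map (fun p => p.2)

-- ===== PORT B =====
-- `min`/`max` inside the comprehension run over a provably non-empty generator
-- (some row reaches index i whenever i < maxlen), so the `.getD 0` defaults are unreachable.
def consolidate_predictions_alt (predictions : List (List (Int × Int))) : List (Int × Int) :=
  let maxlen := (PySem.List.max? (predictions.map (fun p => (p.length : Int))) (fun x => x)).getD 0
  (PySem.List.pyRange 0 maxlen 1).map (fun i =>
    let col := (predictions.filter (fun p => i < (p.length : Int))).map
      (fun p => PySem.List.pyGetD p i (0, 0))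
    ((PySem.List.min? (col.map (fun x => x.1)) (fun x => x)).getD 0,
     (PySem.List.max? (col.map (fun x => x.2)) (fun x => x)).getD 0))

-- ===== PRECONDITION & SPEC =====
def Spec_consolidate_predictions (predictions : List (List (Int × Int))) (out : List (Int × Int)) : Prop := out = consolidate_predictions_alt predictions
instance (predictions : List (List (Int × Int))) (out : List (Int × Int)) : Decidable (Spec_consolidate_predictions predictions out) := by unfold Spec_consolidate_predictions; infer_instance

-- ===== CLAIM (what is proved, stated in full; the proofs are below) =====
def Claim_equal_consolidate_predictions : Prop := ∀ (predictions : List (List (Int × Int))), Dom_consolidate_predictions predictions → Spec_consolidate_predictions predictions (consolidate_predictions predictions)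

-- ===== LEMMAS AND PROOFS =====

/-- the dense dict A maintains: keys 0..m-1 in order, value `f j` at key `j`. -/
def mkPat (f : Nat → Int × Int) (m : Nat) : PySem.Dict Int (Int × Int) :=
  PySem.Dict.mk ((List.range m).map (fun (j : Nat) => ((j : Int), f j)))

def step2 (a b : Int × Int) : Int × Int := (min a.1 b.1, max a.2 b.2)

def colAt (rows : List (List (Int × Int))) (j : Nat) : List (Int × Int) :=
  (rows.filter (fun p => j < p.length)).map (fun p => p.getD j (0, 0))

def comb (l : List (Int × Int)) : Int × Int :=
  match l with
  | [] => (0, 0)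
  | x :: t => t.foldl step2 x

def maxLen (rows : List (List (Int × Int))) : Nat :=
  rows.foldl (fun a r => max a r.length) 0

theorem mkPat_congr (f g : Nat → Int × Int) (m : Nat)
    (h : ∀ j < m, f j = g j) : mkPat f m = mkPat g m := by
  unfold mkPat
  congr 1
  apply List.map_congr_left
  intro j hj
  rw [h j (List.mem_range.mp hj)]

theorem keys_mkPat (f : Nat → Int × Int) (m : Nat) :
    (mkPat f m).keys = (List.range m).map (fun (j : Nat) => (j : Int)) := by
  simp [mkPat, PySem.Dict.keys]

theorem nodup_keys_mkPat (f : Nat → Int × Int) (m : Nat) : (mkPat f m).keys.Nodup := by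
  rw [keys_mkPat]
  exact List.nodup_range.map (fun a b h => by exact_mod_cast h)

theorem contains_mkPat (f : Nat → Int × Int) (m i : Nat) :
    (mkPat f m).contains (i : Int) = decide (i < m) := by
  rw [PySem.Dict.contains_eq_decide_mem_keys, keys_mkPat]
  simp [List.mem_map, List.mem_range]

theorem getD_mkPat (f : Nat → Int × Int) (m i : Nat) (d : Int × Int) :
    (mkPat f m).getD (i : Int) d = if i < m then f i else d := by
  by_cases h : i < m
  · rw [if_pos h]
    refine PySem.Dict.getD_of_mem_items _ ?_ (nodup_keys_mkPat f m) d
    show ((i : Int), f i) ∈ (List.range m).map (fun (j : Nat) => ((j : Int), f j))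
    exact List.mem_map.mpr ⟨i, List.mem_range.mpr h, rfl⟩
  · rw [if_neg h]
    exact PySem.Dict.getD_of_not_contains _ d (by rw [contains_mkPat]; simpa using h)

theorem insert_mkPat_lt (f : Nat → Int × Int) (m i : Nat) (v : Int × Int) (h : i < m) :
    (mkPat f m).insert (i : Int) v = mkPat (fun j => if j = i then v else f j) m := by
  apply PySem.Dict.ext
  rw [PySem.Dict.items_insert_of_contains _ _ (by rw [contains_mkPat]; simpa using h)]
  show (((List.range m).map (fun (j : Nat) => ((j : Int), f j))).map _) = _
  rw [List.map_map]
  apply List.map_congr_left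
  intro j hj
  by_cases hji : j = i
  · subst hji; simp
  · have : ¬ ((j : Int) == (i : Int)) = true := by
      simp; omega
    simp [Function.comp, this, hji]

theorem insert_mkPat_self (f : Nat → Int × Int) (m : Nat) (v : Int × Int) :
    (mkPat f m).insert (m : Int) v = mkPat (fun j => if j = m then v else f j) (m + 1) := by
  apply PySem.Dict.ext
  rw [PySem.Dict.items_insert_of_not_contains _ _ (by rw [contains_mkPat]; simp)]
  show ((List.range m).map (fun (j : Nat) => ((j : Int), f j))) ++ _ = _
  unfold mkPat
  rw [List.range_succ, List.map_append]
  congr 1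
  · apply List.map_congr_left
    intro j hj
    have : j ≠ m := by have := List.mem_range.mp hj; omega
    simp [this]
  · simp

theorem consStep_mkPat (f : Nat → Int × Int) (m i : Nat) (x : Int × Int) (h : i ≤ m) :
    consolidateStep (mkPat f m) ((i : Int), x) =
      mkPat (fun j => if j = i then (if i < m then step2 (f i) x else x) else f j)
        (max m (i + 1)) := by
  unfold consolidateStep
  by_cases hi : i < m
  · simp only [contains_mkPat, hi, decide_true, if_true]
    rw [getD_mkPat f m i x, if_pos hi, insert_mkPat_lt f m i _ hi]
    rw [show max m (i + 1) = m from by omega]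
    apply mkPat_congr
    intro j hj
    by_cases hji : j = i <;> simp [hji, step2]
  · have him : i = m := by omega
    subst him
    simp only [contains_mkPat, lt_irrefl, decide_false, Bool.false_eq_true, if_false]
    rw [insert_mkPat_self f i x]
    rw [show (mkPat (fun j => if j = i then x else f j) (i + 1)).getD (i : Int) x = x from by
      rw [getD_mkPat]; simp]
    rw [insert_mkPat_lt _ _ _ _ (by omega : i < i + 1)]
    rw [show max i (i + 1) = i + 1 from by omega]
    apply mkPat_congr
    intro j hj
    by_cases hji : j = i <;> simp [hji]

/-- effect of A's inner loop over one row on a dense dict. -/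
def rowF (f : Nat → Int × Int) (m : Nat) (q : List (Int × Int)) (j : Nat) : Int × Int :=
  if j < q.length then
    (if j < m then step2 (f j) (q.getD j (0, 0)) else q.getD j (0, 0))
  else f j

theorem row_lemma (q : List (Int × Int)) (f : Nat → Int × Int) (m : Nat) :
    (PySem.List.enumerate q 0).foldl consolidateStep (mkPat f m) =
      mkPat (rowF f m q) (max m q.length) := by
  induction q using List.reverseRecOn with
  | nil =>
      simp [PySem.List.enumerate_nil]
      apply mkPat_congr
      intro j hj
      simp [rowF]
  | append_singleton q' x ih =>
      rw [show PySem.List.enumerate (q' ++ [x]) 0 =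
            PySem.List.enumerate q' 0 ++ [((q'.length : Int), x)] from by
        rw [PySem.List.enumerate_append, PySem.List.enumerate_cons, PySem.List.enumerate_nil]
        simp]
      rw [List.foldl_append, ih]
      simp only [List.foldl_cons, List.foldl_nil]
      rw [consStep_mkPat (rowF f m q') (max m q'.length) q'.length x (by omega)]
      rw [show max (max m q'.length) (q'.length + 1) = max m (q'.length + 1) from by omega]
      rw [show (q' ++ [x]).length = q'.length + 1 from by simp]
      apply mkPat_congr
      intro j hj
      have hget2 : (q' ++ [x]).getD q'.length (0, 0) = x := by
        rw [List.getD_append_right q' [x] (0, 0) q'.length (le_refl _)]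
        simp
      by_cases hjL : j = q'.length
      · subst hjL
        by_cases hjm : q'.length < m
        · simp [rowF, hjm, (show q'.length < max m q'.length by omega)]
        · simp [rowF, hjm, (show ¬ q'.length < max m q'.length by omega)]
      · by_cases hjlt : j < q'.length
        · have hget : (q' ++ [x]).getD j (0, 0) = q'.getD j (0, 0) :=
            List.getD_append q' [x] (0, 0) j hjlt
          have hb : j < (q' ++ [x]).length := by simp; omega
          simp only [rowF, if_neg hjL, if_pos hjlt, if_pos hb, hget]
        · simp [rowF, hjL, hjlt, (show ¬ j ≤ q'.length by omega)]

theorem maxLen_append (rows : List (List (Int × Int))) (p : List (Int × Int)) :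
    maxLen (rows ++ [p]) = max (maxLen rows) p.length := by
  unfold maxLen
  rw [List.foldl_append]
  rfl

theorem maxLen_le_iff (rows : List (List (Int × Int))) (j : Nat) :
    maxLen rows ≤ j ↔ ∀ r ∈ rows, r.length ≤ j := by
  induction rows using List.reverseRecOn with
  | nil => simp [maxLen]
  | append_singleton rows' p ih =>
      rw [maxLen_append]
      constructor
      · intro h r hr
        rcases List.mem_append.mp hr with hr' | hr'
        · exact ih.mp (by omega) r hr'
        · simp at hr'; subst hr'; omega
      · intro h
        have h1 : maxLen rows' ≤ j := ih.mpr (fun r hr => h r (by simp [hr]))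
        have h2 : p.length ≤ j := h p (by simp)
        omega

theorem colAt_append (rows : List (List (Int × Int))) (p : List (Int × Int)) (j : Nat) :
    colAt (rows ++ [p]) j =
      colAt rows j ++ (if j < p.length then [p.getD j (0, 0)] else []) := by
  unfold colAt
  rw [List.filter_append, List.map_append]
  congr 1
  by_cases h : j < p.length <;> simp [h]

theorem colAt_eq_nil_of_maxLen_le (rows : List (List (Int × Int))) (j : Nat)
    (h : maxLen rows ≤ j) : colAt rows j = [] := by
  unfold colAt
  rw [List.map_eq_nil_iff, List.filter_eq_nil_iff]
  intro r hr
  have := (maxLen_le_iff rows j).mp h r hr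
  simpa using by omega
  
theorem colAt_ne_nil_of_lt_maxLen (rows : List (List (Int × Int))) (j : Nat)
    (h : j < maxLen rows) : colAt rows j ≠ [] := by
  unfold colAt
  intro hc
  rw [List.map_eq_nil_iff, List.filter_eq_nil_iff] at hc
  have : ∀ r ∈ rows, r.length ≤ j := by
    intro r hr
    have := hc r hr
    simp at this
    omega
  have := (maxLen_le_iff rows j).mpr this
  omega

theorem comb_append (l : List (Int × Int)) (x : Int × Int) (h : l ≠ []) :
    comb (l ++ [x]) = step2 (comb l) x := by
  cases l with
  | nil => exact absurd rfl h
  | cons y t => simp [comb, List.foldl_append]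

theorem outer_lemma (rows : List (List (Int × Int))) :
    rows.foldl (fun pat prices => (PySem.List.enumerate prices).foldl consolidateStep pat)
        PySem.Dict.empty =
      mkPat (fun j => comb (colAt rows j)) (maxLen rows) := by
  induction rows using List.reverseRecOn with
  | nil => rfl
  | append_singleton rows' p ih =>
      rw [List.foldl_append, List.foldl_cons, List.foldl_nil, ih, row_lemma,
        maxLen_append]
      apply mkPat_congr
      intro j hj
      rw [colAt_append]
      by_cases hp : j < p.length
      · rw [if_pos hp]
        by_cases hm : j < maxLen rows'
        · rw [comb_append _ _ (colAt_ne_nil_of_lt_maxLen rows' j hm)]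
          simp [rowF, hp, hm]
        · rw [colAt_eq_nil_of_maxLen_le rows' j (by omega), List.nil_append]
          simp [rowF, hp, hm, comb]
      · rw [if_neg hp, List.append_nil]
        simp [rowF, hp]

theorem maxLen_cast (t : List (List (Int × Int))) (a : Nat) :
    (t.map (fun p => (p.length : Int))).foldl max (a : Int) =
      ((t.foldl (fun a r => max a r.length) a : Nat) : Int) := by
  induction t generalizing a with
  | nil => rfl
  | cons r t ih =>
      simp only [List.map_cons, List.foldl_cons]
      rw [← Nat.cast_max, ih]

theorem maxlen_b_eq (rows : List (List (Int × Int))) :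
    (PySem.List.max? (rows.map (fun p => (p.length : Int))) (fun x => x)).getD 0 =
      ((maxLen rows : Nat) : Int) := by
  cases rows with
  | nil => rfl
  | cons r t =>
      rw [List.map_cons, PySem.List.max?_id_cons]
      simp only [Option.getD_some]
      rw [maxLen_cast]
      unfold maxLen
      simp

theorem fst_foldl_step2 (t : List (Int × Int)) (x : Int × Int) :
    (t.foldl step2 x).1 = (t.map (fun p => p.1)).foldl min x.1 := by
  induction t generalizing x with
  | nil => rfl
  | cons y t ih => simp [List.foldl_cons, ih, step2]

theorem snd_foldl_step2 (t : List (Int × Int)) (x : Int × Int) :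
    (t.foldl step2 x).2 = (t.map (fun p => p.2)).foldl max x.2 := by
  induction t generalizing x with
  | nil => rfl
  | cons y t ih => simp [List.foldl_cons, ih, step2]

-- ===== VERDICT (by name: the statement is the Claim_ definition above) =====
theorem consolidate_predictions_spec : Claim_equal_consolidate_predictions := by
  intro rows _
  unfold Spec_consolidate_predictions
  simp only [consolidate_predictions, consolidate_predictions_alt]
  rw [outer_lemma, maxlen_b_eq]
  set M := maxLen rows with hM
  -- A's sorted(items) is items itself: keys are strictly increasing
  have hsorted : PySem.List.sorted (mkPat (fun j => comb (colAt rows j)) M).items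
      (fun x => x.1) false = (mkPat (fun j => comb (colAt rows j)) M).items := by
    apply PySem.List.sorted_eq_self_of_pairwise
    show ((List.range M).map _).Pairwise _
    apply List.Pairwise.map
    · intro a b (hab : a < b)
      show ((a : Nat) : Int) ≤ ((b : Nat) : Int)
      exact_mod_cast Nat.le_of_lt hab
    · exact List.pairwise_lt_range
  rw [hsorted]
  show ((List.range M).map _).map _ = (PySem.List.pyRange 0 (M : Int) 1).map _
  rw [PySem.List.pyRange_zero_natCast, List.map_map, List.map_map]
  apply List.map_congr_left
  intro j hj
  have hjM : j < M := List.mem_range.mp hj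
  simp only [Function.comp]
  simp only [PySem.List.pyGetD_natCast, Nat.cast_lt]
  rw [show (List.filter (fun p : List (Int × Int) => decide (j < p.length)) rows).map
        (fun p => p.getD j (0, 0)) = colAt rows j from rfl]
  have hne := colAt_ne_nil_of_lt_maxLen rows j hjM
  cases hcc : colAt rows j with
  | nil => exact absurd hcc hne
  | cons x t =>
      simp only [comb, List.map_cons, PySem.List.min?_id_cons, PySem.List.max?_id_cons,
        Option.getD_some]
      rw [Prod.ext_iff]
      exact ⟨fst_foldl_step2 t x, snd_foldl_step2 t x⟩
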